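-- pv_equiv track=rewrite | github.com/Pinkwjp/Hello-Algorithms | sorting_algorithms/merge_sort_natural.py | merge_sort_natural
-- ===== SOURCE A (Python) =====
-- from typing import List
--
-- def merge(A: List[int], B: List[int]) -> List[int]:
--     """merge two sorted lists"""
--     combined: List[int] = []
--     while A and B:
--         # merge backward, from big to small
--         a = A.pop()
--         b = B.pop()
--         if a >= b:
--             combined.append(a)
--             B.append(b)
--         else:
--             combined.append(b)
--             A.append(a)
--     # either A or B is empty, put leftover in A
--     A += B
--     while A:
--         combined.append(A.pop())
--     # reverse to small to big
--     combined.reverse()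
--     return combined
--
-- def merge_sort_natural(A: List[int]) -> List[int]:
--     """sort a list of numbers"""
--     if len(A) < 2: return A
--     sorted_sublists: List[List[int]] = []
--     # select naturally occurring sorted sublists
--     sublist: List[int] = []
--     for x in A:
--         if (not sublist) or (sublist[-1] <= x):
--             sublist.append(x)
--         else:
--             sorted_sublists.append(sublist)
--             sublist = [x]
--     # collect the last sublist
--     if sublist: sorted_sublists.append(sublist)
--     # merge sublists
--     while len(sorted_sublists) > 1:
--         sublist_a = sorted_sublists.pop()
--         sublist_b = sorted_sublists.pop()
--         combined = merge(sublist_a, sublist_b)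
--         sorted_sublists.append(combined)
--     return sorted_sublists.pop()
-- ===== SOURCE B (Python) =====
-- from typing import List
--
-- def _merge(xs: List[int], ys: List[int]) -> List[int]:
--     """forward two-pointer merge of two sorted lists"""
--     out: List[int] = []
--     i = j = 0
--     while i < len(xs) and j < len(ys):
--         if xs[i] <= ys[j]:
--             out.append(xs[i]); i += 1
--         else:
--             out.append(ys[j]); j += 1
--     out.extend(xs[i:])
--     out.extend(ys[j:])
--     return out
--
-- def merge_sort_natural(A: List[int]) -> List[int]:
--     """sort a list of numbers: balanced bottom-up merging of the natural runs"""
--     if len(A) < 2: return A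
--     runs: List[List[int]] = []
--     run = [A[0]]
--     for x in A[1:]:
--         if run[-1] <= x:
--             run.append(x)
--         else:
--             runs.append(run)
--             run = [x]
--     runs.append(run)
--     # merge adjacent runs pairwise until one remains
--     while len(runs) > 1:
--         merged: List[List[int]] = []
--         for i in range(0, len(runs) - 1, 2):
--             merged.append(_merge(runs[i], runs[i + 1]))
--         if len(runs) % 2:
--             merged.append(runs[-1])
--         runs = merged
--     return runs[0]
-- ===== Notes on version B (the rewrite author's own statement) =====
-- stated objective: faster
-- what changed: A repeatedly pops the last two natural runs and merges them with a backward pop-and-push merge (the accumulated result is re-merged with every remaining run, O(n*k)); B merges adjacent runs pairwise in balanced rounds with a forward two-pointer merge, O(n log k).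
import Mathlib
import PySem

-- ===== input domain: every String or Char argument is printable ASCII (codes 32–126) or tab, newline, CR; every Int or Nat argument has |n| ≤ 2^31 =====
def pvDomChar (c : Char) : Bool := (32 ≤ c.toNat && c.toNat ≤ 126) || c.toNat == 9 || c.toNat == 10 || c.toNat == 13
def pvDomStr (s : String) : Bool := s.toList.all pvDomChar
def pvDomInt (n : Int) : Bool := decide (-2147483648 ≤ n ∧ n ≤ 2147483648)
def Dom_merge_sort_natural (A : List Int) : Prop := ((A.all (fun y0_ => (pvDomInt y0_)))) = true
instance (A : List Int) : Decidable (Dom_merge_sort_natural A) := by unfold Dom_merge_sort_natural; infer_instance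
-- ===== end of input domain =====

-- B replaces A's linear pop-two-merge-push loop over the natural runs (and its backward pop-based
-- merge) by one round-based balanced pairwise bottom-up merging with a forward two-pointer merge;
-- objective: faster (measured). Equivalence is about the return value (neither program mutates its argument).

-- ===== PORT A =====
-- 'while A and B: a = A.pop(); b = B.pop(); …' — state (A, B, combined); pop = getLast?/dropLast
def mergeLoop (A B c : List Int) : List Int × List Int × List Int :=
  match hA : A.getLast?, hB : B.getLast? with
  | some a, some b =>
      if a ≥ b then mergeLoop A.dropLast (B.dropLast ++ [b]) (c ++ [a])
      else mergeLoop (A.dropLast ++ [a]) B.dropLast (c ++ [b])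
  | _, _ => (A, B, c)
termination_by A.length + B.length
decreasing_by
  all_goals
    have hA' : A ≠ [] := by rintro rfl; simp at hA
    have hB' : B ≠ [] := by rintro rfl; simp at hB
    have h1 : 0 < A.length := List.length_pos_iff.mpr hA'
    have h2 : 0 < B.length := List.length_pos_iff.mpr hB'
    simp only [List.length_append, List.length_dropLast, List.length_cons, List.length_nil]
    omega

-- def merge(A, B): the loop, then 'A += B; while A: combined.append(A.pop()); combined.reverse()'
def merge_py (A B : List Int) : List Int :=
  let t := mergeLoop A B []
  let leftover := t.1 ++ t.2.1
  (t.2.2 ++ leftover.reverse).reverse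

-- 'for x in A: if (not sublist) or (sublist[-1] <= x): …' — returns (sorted_sublists, sublist)
def runsLoopA (sublist : List Int) (acc : List (List Int)) : List Int → List (List Int) × List Int
  | [] => (acc, sublist)
  | x :: rest =>
      if sublist = [] ∨ sublist.getLast?.getD 0 ≤ x then runsLoopA (sublist ++ [x]) acc rest
      else runsLoopA [x] (acc ++ [sublist]) rest

-- 'while len(sorted_sublists) > 1: pop two from the end, merge, append', then a final pop
def outerLoop (runs : List (List Int)) : List Int :=
  if h : 1 < runs.length then
    let a := runs.getLast?.getD []
    let rest := runs.dropLast
    let b := rest.getLast?.getD []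
    outerLoop (rest.dropLast ++ [merge_py a b])
  else runs.getLast?.getD []
termination_by runs.length
decreasing_by simp [List.length_dropLast]; omega

def merge_sort_natural (A : List Int) : List Int :=
  if A.length < 2 then A
  else
    let p := runsLoopA [] [] A
    let ss := if p.2 ≠ [] then p.1 ++ [p.2] else p.1
    outerLoop ss

-- ===== PORT B =====
-- _merge: forward two-pointer merge; 'out.append' loop ported as accumulator + final reverse
def mergeFwd : List Int → List Int → List Int → List Int
  | x :: xs, y :: ys, out =>
      if x ≤ y then mergeFwd xs (y :: ys) (x :: out)
      else mergeFwd (x :: xs) ys (y :: out)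
  | xs, ys, out => out.reverse ++ xs ++ ys

-- 'for x in A[1:]: if run[-1] <= x: …; runs.append(run)'
def runsLoopB (run : List Int) (acc : List (List Int)) : List Int → List (List Int)
  | [] => acc ++ [run]
  | x :: rest =>
      if run.getLast?.getD 0 ≤ x then runsLoopB (run ++ [x]) acc rest
      else runsLoopB [x] (acc ++ [run]) rest

-- one round of 'for i in range(0, len(runs)-1, 2): merged.append(_merge(runs[i], runs[i+1]))'
-- plus the odd leftover: adjacent pairs, two at a time
def pairRound : List (List Int) → List (List Int)
  | a :: b :: rest => mergeFwd a b [] :: pairRound rest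
  | rest => rest

theorem pairRound_length (l : List (List Int)) : (pairRound l).length = (l.length + 1) / 2 := by
  induction l using pairRound.induct with
  | case1 a b rest ih => simp only [pairRound, List.length_cons, ih]; omega
  | case2 rest h =>
    cases rest with
    | nil => simp [pairRound]
    | cons a t =>
      cases t with
      | nil => simp [pairRound]
      | cons b t' => exact (h a b t' rfl).elim

-- 'while len(runs) > 1: runs = merged'
def mergeRounds : List (List Int) → List Int
  | [] => []
  | [r] => r
  | a :: b :: rest => mergeRounds (pairRound (a :: b :: rest))
termination_by runs => runs.length
decreasing_by simp only [pairRound_length, List.length_cons]; omega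

def merge_sort_natural_alt (A : List Int) : List Int :=
  if A.length < 2 then A
  else
    match A with
    | [] => []
    | x :: rest => mergeRounds (runsLoopB [x] [] rest)

-- ===== PRECONDITION & SPEC =====
def Spec_merge_sort_natural (A : List Int) (out : List Int) : Prop := out = merge_sort_natural_alt A
instance (A : List Int) (out : List Int) : Decidable (Spec_merge_sort_natural A out) := by unfold Spec_merge_sort_natural; infer_instance

-- ===== CLAIM (what is proved, stated in full; the proofs are below) =====
def Claim_equal_merge_sort_natural : Prop := ∀ (A : List Int), Dom_merge_sort_natural A → Spec_merge_sort_natural A (merge_sort_natural A)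

-- ===== LEMMAS AND PROOFS =====

-- every element of a sorted (≤-pairwise) list is ≤ its last element
theorem sorted_le_last {l : List Int} {m x : Int} (hs : List.Pairwise (· ≤ ·) l)
    (hm : l.getLast? = some m) (hx : x ∈ l) : x ≤ m := by
  induction l with
  | nil => simp at hx
  | cons a t ih =>
    cases t with
    | nil =>
      simp at hm hx
      omega
    | cons b t' =>
      have hm' : (b :: t').getLast? = some m := by simpa using hm
      rcases List.mem_cons.mp hx with rfl | hxt
      · exact (List.pairwise_cons.mp hs).1 m (List.mem_of_getLast? hm')
      · exact ih ((List.pairwise_cons.mp hs).2) hm' hxt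

-- appending an element ≥ the last keeps the list sorted
theorem sorted_concat {l : List Int} {x : Int} (hs : List.Pairwise (· ≤ ·) l)
    (h : l = [] ∨ l.getLast?.getD 0 ≤ x) : List.Pairwise (· ≤ ·) (l ++ [x]) := by
  by_cases hne : l = []
  · subst hne; simp
  · rw [List.pairwise_append]
    refine ⟨hs, by simp, fun a ha b hb => ?_⟩
    have hbx : b = x := by simpa using hb
    have hm := List.getLast?_eq_some_getLast hne
    have h2 : l.getLast hne ≤ x := by
      rcases h with h' | h'
      · exact absurd h' hne
      · rw [hm] at h'; simpa using h'
    simpa [hbx] using le_trans (sorted_le_last hs hm ha) h2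

-- ---- A-side merge ----

-- one-step unfolding equations for mergeLoop
theorem mergeLoop_step1 {A B c : List Int} {a b : Int} (hgA : A.getLast? = some a)
    (hgB : B.getLast? = some b) (h : a ≥ b) :
    mergeLoop A B c = mergeLoop A.dropLast (B.dropLast ++ [b]) (c ++ [a]) := by
  rw [mergeLoop, hgA, hgB]; simp [h]

theorem mergeLoop_step2 {A B c : List Int} {a b : Int} (hgA : A.getLast? = some a)
    (hgB : B.getLast? = some b) (h : ¬ a ≥ b) :
    mergeLoop A B c = mergeLoop (A.dropLast ++ [a]) B.dropLast (c ++ [b]) := by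
  rw [mergeLoop, hgA, hgB]; simp [h]

theorem mergeLoop_base {A B c : List Int}
    (h : ∀ (a b : Int), A.getLast? = some a → B.getLast? = some b → False) :
    mergeLoop A B c = (A, B, c) := by
  rw [mergeLoop]
  rcases hA : A.getLast? with _ | a
  · rfl
  · rcases hB : B.getLast? with _ | b
    · rfl
    · exact absurd (h a b hA hB) (by simp)

theorem mergeLoop_perm (A B c : List Int) :
    (((mergeLoop A B c).1 ++ (mergeLoop A B c).2.1 ++ (mergeLoop A B c).2.2 : List Int) : Multiset Int)
      = ((A ++ B ++ c : List Int) : Multiset Int) := by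
  induction A, B, c using mergeLoop.induct with
  | case1 A B c a b hgA hgB hge ih =>
    rw [mergeLoop_step1 hgA hgB hge, ih]
    have hA' : A ≠ [] := by rintro rfl; simp at hgA
    have hB' : B ≠ [] := by rintro rfl; simp at hgB
    have ha : a = A.getLast hA' := by rw [List.getLast?_eq_some_getLast hA'] at hgA; injection hgA; omega
    have hb : b = B.getLast hB' := by rw [List.getLast?_eq_some_getLast hB'] at hgB; injection hgB; omega
    conv_rhs => rw [← List.dropLast_concat_getLast hA', ← ha, ← List.dropLast_concat_getLast hB', ← hb]
    simp only [← Multiset.coe_add]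
    abel
  | case2 A B c a b hgA hgB hge ih =>
    rw [mergeLoop_step2 hgA hgB hge, ih]
    have hA' : A ≠ [] := by rintro rfl; simp at hgA
    have hB' : B ≠ [] := by rintro rfl; simp at hgB
    have ha : a = A.getLast hA' := by rw [List.getLast?_eq_some_getLast hA'] at hgA; injection hgA; omega
    have hb : b = B.getLast hB' := by rw [List.getLast?_eq_some_getLast hB'] at hgB; injection hgB; omega
    conv_rhs => rw [← List.dropLast_concat_getLast hA', ← ha, ← List.dropLast_concat_getLast hB', ← hb]
    simp only [← Multiset.coe_add]
    abel
  | case3 A B c hnone => rw [mergeLoop_base hnone]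

theorem mergeLoop_inv (A B c : List Int) :
    List.Pairwise (· ≤ ·) A → List.Pairwise (· ≤ ·) B → List.Pairwise (· ≥ ·) c →
    (∀ x ∈ A, ∀ y ∈ c, x ≤ y) → (∀ x ∈ B, ∀ y ∈ c, x ≤ y) →
    List.Pairwise (· ≤ ·) (mergeLoop A B c).1 ∧ List.Pairwise (· ≤ ·) (mergeLoop A B c).2.1 ∧
    List.Pairwise (· ≥ ·) (mergeLoop A B c).2.2 ∧
    (∀ x ∈ (mergeLoop A B c).1, ∀ y ∈ (mergeLoop A B c).2.2, x ≤ y) ∧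
    (∀ x ∈ (mergeLoop A B c).2.1, ∀ y ∈ (mergeLoop A B c).2.2, x ≤ y) ∧
    ((mergeLoop A B c).1 = [] ∨ (mergeLoop A B c).2.1 = []) := by
  induction A, B, c using mergeLoop.induct with
  | case1 A B c a b hgA hgB hge ih =>
    intro hA hB hc hAc hBc
    rw [mergeLoop_step1 hgA hgB hge]
    have hA' : A ≠ [] := by rintro rfl; simp at hgA
    have hB' : B ≠ [] := by rintro rfl; simp at hgB
    have hBeq : B.dropLast ++ [b] = B := by
      have hb : b = B.getLast hB' := by rw [List.getLast?_eq_some_getLast hB'] at hgB; injection hgB; omega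
      rw [hb]; exact List.dropLast_concat_getLast hB'
    have haA : a ∈ A := List.mem_of_getLast? hgA
    apply ih
    · exact hA.sublist (List.dropLast_sublist A)
    · rw [hBeq]; exact hB
    · rw [List.pairwise_append]
      exact ⟨hc, by simp, fun u hu v hv => by
        have hva : v = a := by simpa using hv
        rw [hva]; exact hAc a haA u hu⟩
    · intro x hx y hy
      rcases List.mem_append.mp hy with hy | hy
      · exact hAc x (List.dropLast_sublist A |>.mem hx) y hy
      · have hya : y = a := by simpa using hy
        rw [hya]; exact sorted_le_last hA hgA (List.dropLast_sublist A |>.mem hx)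
    · intro x hx y hy
      rw [hBeq] at hx
      rcases List.mem_append.mp hy with hy | hy
      · exact hBc x hx y hy
      · have hya : y = a := by simpa using hy
        have := sorted_le_last hB hgB hx
        omega
  | case2 A B c a b hgA hgB hge ih =>
    intro hA hB hc hAc hBc
    rw [mergeLoop_step2 hgA hgB hge]
    have hA' : A ≠ [] := by rintro rfl; simp at hgA
    have hB' : B ≠ [] := by rintro rfl; simp at hgB
    have hAeq : A.dropLast ++ [a] = A := by
      have ha : a = A.getLast hA' := by rw [List.getLast?_eq_some_getLast hA'] at hgA; injection hgA; omega
      rw [ha]; exact List.dropLast_concat_getLast hA'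
    have hbB : b ∈ B := List.mem_of_getLast? hgB
    apply ih
    · rw [hAeq]; exact hA
    · exact hB.sublist (List.dropLast_sublist B)
    · rw [List.pairwise_append]
      exact ⟨hc, by simp, fun u hu v hv => by
        have hvb : v = b := by simpa using hv
        rw [hvb]; exact hBc b hbB u hu⟩
    · intro x hx y hy
      rw [hAeq] at hx
      rcases List.mem_append.mp hy with hy | hy
      · exact hAc x hx y hy
      · have hyb : y = b := by simpa using hy
        have := sorted_le_last hA hgA hx
        omega
    · intro x hx y hy
      rcases List.mem_append.mp hy with hy | hy
      · exact hBc x (List.dropLast_sublist B |>.mem hx) y hy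
      · have hyb : y = b := by simpa using hy
        rw [hyb]; exact sorted_le_last hB hgB (List.dropLast_sublist B |>.mem hx)
  | case3 A B c hnone =>
    intro hA hB hc hAc hBc
    rw [mergeLoop_base hnone]
    refine ⟨hA, hB, hc, hAc, hBc, ?_⟩
    by_cases hA0 : A = []
    · exact Or.inl hA0
    · by_cases hB0 : B = []
      · exact Or.inr hB0
      · exact (hnone _ _ (List.getLast?_eq_some_getLast hA0) (List.getLast?_eq_some_getLast hB0)).elim

theorem merge_py_spec (A B : List Int)
    (hA : List.Pairwise (· ≤ ·) A) (hB : List.Pairwise (· ≤ ·) B) :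
    List.Pairwise (· ≤ ·) (merge_py A B) ∧ (merge_py A B).Perm (A ++ B) := by
  obtain ⟨h1, h2, h3, h4, h5, h6⟩ := mergeLoop_inv A B [] hA hB (by simp) (by simp) (by simp)
  have hperm : ((mergeLoop A B []).1 ++ (mergeLoop A B []).2.1 ++ (mergeLoop A B []).2.2).Perm (A ++ B) := by
    have := Multiset.coe_eq_coe.mp (mergeLoop_perm A B [])
    simpa using this
  set t := mergeLoop A B [] with ht
  constructor
  · show List.Pairwise (· ≤ ·) ((t.2.2 ++ (t.1 ++ t.2.1).reverse).reverse)
    rw [List.reverse_append, List.reverse_reverse, List.pairwise_append]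
    refine ⟨?_, List.pairwise_reverse.mpr h3, fun x hx y hy => ?_⟩
    · rcases h6 with h | h <;> rw [h] <;> simpa
    · have hy' : y ∈ t.2.2 := by simpa using hy
      rcases List.mem_append.mp hx with hx | hx
      · exact h4 x hx y hy'
      · exact h5 x hx y hy'
  · show ((t.2.2 ++ (t.1 ++ t.2.1).reverse).reverse).Perm (A ++ B)
    have p1 : ((t.2.2 ++ (t.1 ++ t.2.1).reverse).reverse).Perm (t.2.2 ++ (t.1 ++ t.2.1)) :=
      (List.reverse_perm _).trans (List.Perm.append_left _ (List.reverse_perm _))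
    refine p1.trans (List.perm_append_comm.trans ?_)
    simpa [List.append_assoc] using hperm

theorem outerLoop_step {runs : List (List Int)} (h : 1 < runs.length) :
    outerLoop runs
      = outerLoop (runs.dropLast.dropLast
          ++ [merge_py (runs.getLast?.getD []) (runs.dropLast.getLast?.getD [])]) := by
  rw [outerLoop]; simp [h]

theorem outerLoop_base {runs : List (List Int)} (h : ¬ 1 < runs.length) :
    outerLoop runs = runs.getLast?.getD [] := by
  rw [outerLoop]; simp [h]

theorem outerLoop_spec_aux (n : Nat) : ∀ runs : List (List Int), runs.length ≤ n → runs ≠ [] →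
    (∀ r ∈ runs, List.Pairwise (· ≤ ·) r) →
    List.Pairwise (· ≤ ·) (outerLoop runs) ∧ (outerLoop runs).Perm runs.flatten := by
  induction n with
  | zero =>
    intro runs hl hne _
    exact absurd (List.length_eq_zero_iff.mp (Nat.le_zero.mp hl)) hne
  | succ n ih =>
    intro runs hl hne hs
    by_cases h : 1 < runs.length
    · rw [outerLoop_step h]
      have hrne : runs.dropLast ≠ [] := by
        have hd : runs.dropLast.length = runs.length - 1 := by simp
        intro he; rw [he] at hd; simp at hd; omega
      have haeq : runs.dropLast ++ [runs.getLast?.getD []] = runs := by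
        rw [List.getLast?_eq_some_getLast hne]
        exact List.dropLast_concat_getLast hne
      have hbeq : runs.dropLast.dropLast ++ [runs.dropLast.getLast?.getD []] = runs.dropLast := by
        rw [List.getLast?_eq_some_getLast hrne]
        exact List.dropLast_concat_getLast hrne
      have haMem : runs.getLast?.getD [] ∈ runs := by
        rw [List.getLast?_eq_some_getLast hne]
        simpa using List.getLast_mem hne
      have hbMem : runs.dropLast.getLast?.getD [] ∈ runs := (List.dropLast_sublist runs).mem (by
        rw [List.getLast?_eq_some_getLast hrne]
        simpa using List.getLast_mem hrne)
      obtain ⟨hm1, hm2⟩ :=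
        merge_py_spec (runs.getLast?.getD []) (runs.dropLast.getLast?.getD [])
          (hs _ haMem) (hs _ hbMem)
      have hsub : ∀ r ∈ runs.dropLast.dropLast
          ++ [merge_py (runs.getLast?.getD []) (runs.dropLast.getLast?.getD [])],
          List.Pairwise (· ≤ ·) r := by
        intro r hr
        rcases List.mem_append.mp hr with hr | hr
        · exact hs r (((List.dropLast_sublist _).trans (List.dropLast_sublist _)).mem hr)
        · simp at hr; subst hr; exact hm1
      have hlen : (runs.dropLast.dropLast
          ++ [merge_py (runs.getLast?.getD []) (runs.dropLast.getLast?.getD [])]).length ≤ n := by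
        simp only [List.length_append, List.length_dropLast, List.length_cons, List.length_nil]
        omega
      obtain ⟨ih1, ih2⟩ := ih _ hlen (by simp) hsub
      refine ⟨ih1, ih2.trans ?_⟩
      have hflat : runs.flatten = runs.dropLast.dropLast.flatten
          ++ (runs.dropLast.getLast?.getD [] ++ runs.getLast?.getD []) := by
        conv_lhs => rw [← haeq, ← hbeq]
        simp [List.flatten_append]
      rw [hflat, List.flatten_append]
      simp only [List.flatten_cons, List.flatten_nil, List.append_nil]
      exact List.Perm.append_left _ (hm2.trans List.perm_append_comm)
    · rw [outerLoop_base h]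
      have h1 : runs.length = 1 := by
        have : 0 < runs.length := List.length_pos_iff.mpr hne
        omega
      obtain ⟨r, rfl⟩ := List.length_eq_one_iff.mp h1
      have e1 : ([r] : List (List Int)).getLast?.getD [] = r := by simp
      have e2 : ([r] : List (List Int)).flatten = r := by simp
      rw [e1, e2]
      exact ⟨hs r (by simp), List.Perm.refl r⟩

theorem outerLoop_spec (runs : List (List Int)) (hne : runs ≠ [])
    (hs : ∀ r ∈ runs, List.Pairwise (· ≤ ·) r) :
    List.Pairwise (· ≤ ·) (outerLoop runs) ∧ (outerLoop runs).Perm runs.flatten :=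
  outerLoop_spec_aux runs.length runs le_rfl hne hs

-- runsLoopA: each produced run is sorted, their concatenation is the input, final run nonempty
theorem runsLoopA_spec (xs : List Int) : ∀ (sublist : List Int) (acc : List (List Int)),
    List.Pairwise (· ≤ ·) sublist → (∀ r ∈ acc, List.Pairwise (· ≤ ·) r) →
    (∀ r ∈ (runsLoopA sublist acc xs).1, List.Pairwise (· ≤ ·) r) ∧
    List.Pairwise (· ≤ ·) (runsLoopA sublist acc xs).2 ∧
    (runsLoopA sublist acc xs).1.flatten ++ (runsLoopA sublist acc xs).2
      = acc.flatten ++ sublist ++ xs ∧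
    (sublist ≠ [] ∨ xs ≠ [] → (runsLoopA sublist acc xs).2 ≠ []) := by
  induction xs with
  | nil =>
    intro sublist acc h1 h2
    refine ⟨h2, h1, by simp [runsLoopA], ?_⟩
    rintro (h | h)
    · exact fun hh => h hh
    · simp at h
  | cons x rest ih =>
    intro sublist acc h1 h2
    by_cases hcond : sublist = [] ∨ sublist.getLast?.getD 0 ≤ x
    · have heq : runsLoopA sublist acc (x :: rest) = runsLoopA (sublist ++ [x]) acc rest := by
        simp [runsLoopA, hcond]
      rw [heq]
      obtain ⟨g1, g2, g3, g4⟩ := ih (sublist ++ [x]) acc (sorted_concat h1 hcond) h2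
      exact ⟨g1, g2, by rw [g3]; simp, fun _ => g4 (Or.inl (by simp))⟩
    · have heq : runsLoopA sublist acc (x :: rest) = runsLoopA [x] (acc ++ [sublist]) rest := by
        simp only [runsLoopA, if_neg hcond]
      rw [heq]
      have h2' : ∀ r ∈ acc ++ [sublist], List.Pairwise (· ≤ ·) r := by
        intro r hr
        rcases List.mem_append.mp hr with hr | hr
        · exact h2 r hr
        · simp at hr; subst hr; exact h1
      obtain ⟨g1, g2, g3, g4⟩ := ih [x] (acc ++ [sublist]) (by simp) h2'
      exact ⟨g1, g2, by rw [g3]; simp, fun _ => g4 (Or.inl (by simp))⟩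

-- ---- B-side ----

theorem mergeFwd_eq (xs ys out : List Int) :
    mergeFwd xs ys out = out.reverse ++ xs.merge ys (fun a b => decide (a ≤ b)) := by
  induction xs, ys, out using mergeFwd.induct with
  | case1 x xs y ys out hle ih => rw [mergeFwd, if_pos hle, ih]; simp [hle]
  | case2 x xs y ys out hle ih => rw [mergeFwd, if_neg hle, ih]; simp [hle]
  | case3 xs ys out h =>
    cases xs with
    | nil =>
      rw [mergeFwd]
      · simp [List.nil_merge]
      · simp
    | cons x xs' =>
      cases ys with
      | nil =>
        rw [mergeFwd]
        · simp [List.merge_right]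
        · simp
      | cons y ys' => exact (h x xs' y ys' rfl rfl).elim

theorem mergeFwd_spec (a b : List Int)
    (ha : List.Pairwise (· ≤ ·) a) (hb : List.Pairwise (· ≤ ·) b) :
    List.Pairwise (· ≤ ·) (mergeFwd a b []) ∧ (mergeFwd a b []).Perm (a ++ b) := by
  rw [mergeFwd_eq]; simp
  exact ⟨List.Pairwise.merge ha hb, List.merge_perm_append _⟩

theorem runsLoopB_spec (xs : List Int) : ∀ (run : List Int) (acc : List (List Int)),
    List.Pairwise (· ≤ ·) run → (∀ r ∈ acc, List.Pairwise (· ≤ ·) r) →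
    (∀ r ∈ runsLoopB run acc xs, List.Pairwise (· ≤ ·) r) ∧
    (runsLoopB run acc xs).flatten = acc.flatten ++ run ++ xs ∧
    runsLoopB run acc xs ≠ [] := by
  induction xs with
  | nil =>
    intro run acc h1 h2
    refine ⟨?_, ?_, ?_⟩
    · intro r hr
      have hr' : r ∈ acc ++ [run] := hr
      rcases List.mem_append.mp hr' with hr2 | hr2
      · exact h2 r hr2
      · have : r = run := by simpa using hr2
        rw [this]; exact h1
    · show (acc ++ [run]).flatten = acc.flatten ++ run ++ []
      simp
    · show acc ++ [run] ≠ []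
      simp
  | cons x rest ih =>
    intro run acc h1 h2
    by_cases hcond : run.getLast?.getD 0 ≤ x
    · have heq : runsLoopB run acc (x :: rest) = runsLoopB (run ++ [x]) acc rest := by
        simp [runsLoopB, hcond]
      rw [heq]
      obtain ⟨g1, g2, g3⟩ := ih (run ++ [x]) acc (sorted_concat h1 (Or.inr hcond)) h2
      exact ⟨g1, by rw [g2]; simp, g3⟩
    · have heq : runsLoopB run acc (x :: rest) = runsLoopB [x] (acc ++ [run]) rest := by
        simp [runsLoopB, hcond]
      rw [heq]
      have h2' : ∀ r ∈ acc ++ [run], List.Pairwise (· ≤ ·) r := by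
        intro r hr
        rcases List.mem_append.mp hr with hr | hr
        · exact h2 r hr
        · simp at hr; subst hr; exact h1
      obtain ⟨g1, g2, g3⟩ := ih [x] (acc ++ [run]) (by simp) h2'
      exact ⟨g1, by rw [g2]; simp, g3⟩

theorem pairRound_spec (l : List (List Int)) : (∀ r ∈ l, List.Pairwise (· ≤ ·) r) →
    (∀ r ∈ pairRound l, List.Pairwise (· ≤ ·) r) ∧
    ((pairRound l).flatten : Multiset Int) = (l.flatten : Multiset Int) := by
  induction l using pairRound.induct with
  | case1 a b rest ih =>
    intro hs
    obtain ⟨g1, g2⟩ := ih (fun r hr => hs r (by simp [hr]))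
    obtain ⟨m1, m2⟩ := mergeFwd_spec a b (hs a (by simp)) (hs b (by simp))
    constructor
    · intro r hr
      rcases List.mem_cons.mp (by simpa [pairRound] using hr) with rfl | hr
      · exact m1
      · exact g1 r hr
    · show (((mergeFwd a b [] :: pairRound rest).flatten : List Int) : Multiset Int) = _
      have hm2 := (Multiset.coe_eq_coe (l₁ := mergeFwd a b [])).mpr m2
      simp only [List.flatten_cons, ← Multiset.coe_add, g2, hm2]
      abel
  | case2 rest h =>
    intro hs
    have : pairRound rest = rest := by
      cases rest with
      | nil => rfl
      | cons a t =>
        cases t with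
        | nil => rfl
        | cons b t' => exact (h a b t' rfl).elim
    rw [this]
    exact ⟨hs, rfl⟩

theorem mergeRounds_spec (l : List (List Int)) : l ≠ [] →
    (∀ r ∈ l, List.Pairwise (· ≤ ·) r) →
    List.Pairwise (· ≤ ·) (mergeRounds l) ∧ (mergeRounds l).Perm l.flatten := by
  induction l using mergeRounds.induct with
  | case1 => intro hne; exact absurd rfl hne
  | case2 r => intro _ hs; simpa [mergeRounds] using hs r (by simp)
  | case3 a b rest ih =>
    intro _ hs
    obtain ⟨p1, p2⟩ := pairRound_spec (a :: b :: rest) hs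
    obtain ⟨g1, g2⟩ := ih (by simp [pairRound]) p1
    rw [show mergeRounds (a :: b :: rest) = mergeRounds (pairRound (a :: b :: rest)) from by rw [mergeRounds]]
    exact ⟨g1, g2.trans (Multiset.coe_eq_coe.mp p2)⟩

-- ---- top level ----

theorem merge_sort_natural_eq (A : List Int) :
    merge_sort_natural A = merge_sort_natural_alt A := by
  by_cases hlen : A.length < 2
  · simp [merge_sort_natural, merge_sort_natural_alt, hlen]
  · obtain ⟨x, rest, rfl⟩ : ∃ x rest, A = x :: rest := by
      cases A with
      | nil => simp at hlen
      | cons x rest => exact ⟨x, rest, rfl⟩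
    -- A side
    obtain ⟨a1, a2, a3, a4⟩ := runsLoopA_spec (x :: rest) [] [] (by simp) (by simp)
    have hsubne := a4 (Or.inr (by simp))
    set p := runsLoopA [] [] (x :: rest) with hp
    have hssAll : ∀ r ∈ p.1 ++ [p.2], List.Pairwise (· ≤ ·) r := by
      intro r hr
      rcases List.mem_append.mp hr with hr | hr
      · exact a1 r hr
      · simp at hr; subst hr; exact a2
    obtain ⟨o1, o2⟩ := outerLoop_spec (p.1 ++ [p.2]) (by simp) hssAll
    have hAside : merge_sort_natural (x :: rest) = outerLoop (p.1 ++ [p.2]) := by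
      simp only [merge_sort_natural, if_neg hlen, ← hp, if_pos hsubne]
    have hApermA : (merge_sort_natural (x :: rest)).Perm (x :: rest) := by
      rw [hAside]
      refine o2.trans ?_
      rw [List.flatten_append]
      simp only [List.flatten_cons, List.flatten_nil, List.append_nil]
      rw [a3]; simp
    have hAsorted : List.Pairwise (· ≤ ·) (merge_sort_natural (x :: rest)) := by
      rw [hAside]; exact o1
    -- B side
    obtain ⟨b1, b2, b3⟩ := runsLoopB_spec rest [x] [] (by simp) (by simp)
    obtain ⟨m1, m2⟩ := mergeRounds_spec (runsLoopB [x] [] rest) b3 b1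
    have hBside : merge_sort_natural_alt (x :: rest) = mergeRounds (runsLoopB [x] [] rest) := by
      simp only [merge_sort_natural_alt, if_neg hlen]
    have hBpermA : (merge_sort_natural_alt (x :: rest)).Perm (x :: rest) := by
      rw [hBside]
      refine m2.trans ?_
      rw [b2]; simp
    have hBsorted : List.Pairwise (· ≤ ·) (merge_sort_natural_alt (x :: rest)) := by
      rw [hBside]; exact m1
    exact List.Perm.eq_of_pairwise (fun a b _ _ h1 h2 => le_antisymm h1 h2)
      hAsorted hBsorted (hApermA.trans hBpermA.symm)

-- ===== VERDICT (by name: the statement is the Claim_ definition above) =====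
theorem merge_sort_natural_spec : Claim_equal_merge_sort_natural := by
  intro A _
  exact merge_sort_natural_eq A
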